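-- pv_equiv track=rewrite | github.com/Alan-Collins/CRISPR_comparison_toolkit | CRISPR_comparison_toolkit/cctkpkg/blast.py | which_substring_in_string
-- ===== SOURCE A (Python) =====
-- def which_substring_in_string(substrings, string):
--     present = []
--     for s in substrings:
--         if s in string:
--             present.append(s)
--
--     # If more than one present, longest will be best
--     if len(present) > 1:
--         return max(present, key=len)
--     else:
--         return present[0]
-- ===== SOURCE B (Python) =====
-- def which_substring_in_string(substrings, string):
--     best = None
--     for s in substrings:
--         if s in string and (best is None or len(best) < len(s)):
--             best = s
--     return best
-- ===== Notes on version B (the rewrite author's own statement) =====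
-- stated objective: simpler
-- what changed: B replaces A's build-a-filtered-list-then-branch-on-its-length-and-call-max() with a single pass that keeps a running best (first longest present substring), so the intermediate list, the length branch and the separate max() pass disappear.
import Mathlib
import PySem

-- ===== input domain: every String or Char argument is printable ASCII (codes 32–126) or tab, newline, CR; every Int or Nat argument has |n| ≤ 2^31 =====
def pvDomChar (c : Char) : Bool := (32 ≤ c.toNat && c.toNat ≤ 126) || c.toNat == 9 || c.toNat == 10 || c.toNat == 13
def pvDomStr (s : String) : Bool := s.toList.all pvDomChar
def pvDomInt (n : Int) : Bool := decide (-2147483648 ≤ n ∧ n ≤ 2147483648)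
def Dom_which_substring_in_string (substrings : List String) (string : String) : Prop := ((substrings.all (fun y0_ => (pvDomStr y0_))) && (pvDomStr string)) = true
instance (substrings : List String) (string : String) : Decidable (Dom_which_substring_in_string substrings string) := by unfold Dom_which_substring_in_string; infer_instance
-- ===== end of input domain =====

-- B: one pass keeping the running best (first longest present substring) instead of
-- A's filtered list + length branch + max(); equal return values whenever A returns.


-- ===== PORT A =====
def which_substring_in_string (substrings : List String) (string : String) : String :=
  -- present = []; for s in substrings: if s in string: present.append(s)
  let present := substrings.foldl
    (fun acc s => if PySem.Str.isIn s string then acc ++ [s] else acc) []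
  if present.length > 1 then
    -- max(present, key=len): first element of maximal length
    (PySem.List.max? present PySem.Str.len).getD ""
  else
    -- present[0]; IndexError (empty present) is excluded by Pre_
    (PySem.List.pyGet? present 0).getD ""

-- ===== PORT B =====
def which_substring_in_string_alt (substrings : List String) (string : String) : String :=
  -- best = None; for s: if s in string and (best is None or len(best) < len(s)): best = s
  let best := substrings.foldl
    (fun best s =>
      if PySem.Str.isIn s string then
        match best with
        | none => some s
        | some b => if PySem.Str.len b < PySem.Str.len s then some s else some b
      else best)
    (none : Option String)
  -- B returns None when nothing matched; that case is excluded by Pre_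
  best.getD ""

-- ===== PRECONDITION & SPEC =====
-- Pre_ excludes exactly the inputs with no present substring, where A raises IndexError.
def Pre_which_substring_in_string (substrings : List String) (string : String) : Prop :=
  substrings.any (fun s => PySem.Str.isIn s string) = true
instance (substrings : List String) (string : String) : Decidable (Pre_which_substring_in_string substrings string) := by unfold Pre_which_substring_in_string; infer_instance
def pvWitness_which_substring_in_string : List String × String := (["ab", "abc"], "xabcy")

def Spec_which_substring_in_string (substrings : List String) (string : String) (out : String) : Prop := out = which_substring_in_string_alt substrings string
instance (substrings : List String) (string : String) (out : String) : Decidable (Spec_which_substring_in_string substrings string out) := by unfold Spec_which_substring_in_string; infer_instance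

-- ===== CLAIM (what is proved, stated in full; the proofs are below) =====
def Claim_equal_which_substring_in_string : Prop := ∀ (substrings : List String) (string : String), Dom_which_substring_in_string substrings string → Pre_which_substring_in_string substrings string → Spec_which_substring_in_string substrings string (which_substring_in_string substrings string)

-- ===== LEMMAS AND PROOFS =====

-- B's fold, restricted to the present elements, is exactly max? over them.
theorem alt_eq_max (substrings : List String) (string : String) :
    which_substring_in_string_alt substrings string
      = (PySem.List.max?
          (substrings.filter (fun s => PySem.Str.isIn s string)) PySem.Str.len).getD "" := by
  simp only [which_substring_in_string_alt]
  rw [PySem.List.foldl_if_eq_foldl_filter]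
  simp only [PySem.List.max?]
  congr 2
  funext best s
  cases best <;> rfl

-- ===== VERDICT (by name: the statement is the Claim_ definition above) =====
theorem which_substring_in_string_spec : Claim_equal_which_substring_in_string := by
  intro substrings string _hDom hPre
  unfold Spec_which_substring_in_string
  rw [alt_eq_max]
  simp only [which_substring_in_string]
  rw [PySem.List.foldl_append_if_eq_filter, List.nil_append]
  set present := substrings.filter (fun s => PySem.Str.isIn s string) with hp
  have hne : present ≠ [] := by
    unfold Pre_which_substring_in_string at hPre
    simp only [List.any_eq_true] at hPre
    obtain ⟨s, hs, hin⟩ := hPre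
    intro h
    have : s ∈ present := by
      rw [hp, List.mem_filter]; exact ⟨hs, hin⟩
    simp [h] at this
  split_ifs with h
  · rfl
  · -- present has length ≤ 1 and is nonempty: present = [x]
    match present, hne with
    | [x], _ =>
      simp [PySem.List.pyGet?, PySem.List.pyIdx?, PySem.List.max?]
    | x :: y :: t, _ =>
      exfalso; exact h (by simp)
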